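-- pv_equiv track=rewrite | github.com/lecaohao2101/book-ecomerce-by-fastapi | src/helpers/permission.py | get_permission
-- ===== SOURCE A (Python) =====
-- PERMISSION = {
--     "ADMIN": [
--         {"user-model": ["list", "details", "view"]},
--         {"store-model": ["list","details","edit","delete","create"]},
--         {"category-request": ["list","details","edit","delete","create"]},
--         {"/": ["index"]},
--     ],
--     "STORE_OWNER": [
--         {"book-model": ["list","details","edit","delete","create"]},
--         {"category-model": ["list","details","edit","delete","create"]},
--         {"order-model": ["list","details","edit","delete","create"]},
--         {"order-item-model": ["list","details","edit","delete","create"]},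
--         {"category-request": ["list","details","edit","delete","create"]},
--         {"/": ["index"]},
--     ],
--     "CUSTOMER": [],
-- }
--
-- def get_permission(role: str, resource: str, action: str):
--     permissions: list[dict] = PERMISSION.get(role)
--     if permissions:
--         if permissions[0] != "*":
--             count = 0
--             for permission in permissions:
--                 permission_resource = permission.get(resource)
--                 if permission_resource:
--                     if action in permission_resource:
--                         count += 1
--                     else:
--                         continue
--                 else:
--                     continue
--             if count == 0:
--                 return False
--             else:
--                 return True
--         else:
--             return True
--     else:
--         return False
-- ===== SOURCE B (Python) =====
-- CRUD = ("list", "details", "edit", "delete", "create")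
--
-- def get_permission(role: str, resource: str, action: str):
--     # Decision tree: branch on role, then resource, then test the action
--     # against that branch's literal action tuple. No table scan at all.
--     if role == "ADMIN":
--         if resource == "user-model":
--             return action in ("list", "details", "view")
--         if resource in ("store-model", "category-request"):
--             return action in CRUD
--         if resource == "/":
--             return action == "index"
--         return False
--     if role == "STORE_OWNER":
--         if resource in ("book-model", "category-model", "order-model",
--                         "order-item-model", "category-request"):
--             return action in CRUD
--         if resource == "/":
--             return action == "index"
--         return False
--     return False
-- ===== Notes on version B (the rewrite author's own statement) =====
-- stated objective: alternative
-- what changed: B replaces A's scan over the role's list of single-resource dicts (with a match counter and a dead '*' branch) by a hard-coded decision tree: branch on role, then on resource, then test the action against that branch's literal action tuple; no permission table or scan remains.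
import Mathlib
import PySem

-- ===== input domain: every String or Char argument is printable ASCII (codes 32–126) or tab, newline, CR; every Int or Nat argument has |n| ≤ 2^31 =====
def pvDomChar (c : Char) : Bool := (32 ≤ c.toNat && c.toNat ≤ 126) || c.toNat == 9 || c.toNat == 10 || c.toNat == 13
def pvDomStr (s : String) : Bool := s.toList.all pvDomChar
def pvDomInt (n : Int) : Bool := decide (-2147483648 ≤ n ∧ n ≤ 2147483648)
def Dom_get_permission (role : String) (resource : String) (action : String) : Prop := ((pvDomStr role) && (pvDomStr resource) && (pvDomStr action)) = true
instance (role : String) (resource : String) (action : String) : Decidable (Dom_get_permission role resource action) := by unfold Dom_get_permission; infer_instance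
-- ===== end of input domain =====

-- B replaces A's per-call scan of the permission table by a hard-coded role/resource decision tree (alternative decomposition; return value only).

-- ===== PORT A =====
-- A scans the role's list of single-resource dicts, counting dicts whose
-- `resource` entry contains `action`.
def PERMISSION : PySem.Dict String (List (PySem.Dict String (List String))) :=
  PySem.Dict.mk [
    ("ADMIN", [
      PySem.Dict.mk [("user-model", ["list", "details", "view"])],
      PySem.Dict.mk [("store-model", ["list","details","edit","delete","create"])],
      PySem.Dict.mk [("category-request", ["list","details","edit","delete","create"])],
      PySem.Dict.mk [("/", ["index"])]]),
    ("STORE_OWNER", [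
      PySem.Dict.mk [("book-model", ["list","details","edit","delete","create"])],
      PySem.Dict.mk [("category-model", ["list","details","edit","delete","create"])],
      PySem.Dict.mk [("order-model", ["list","details","edit","delete","create"])],
      PySem.Dict.mk [("order-item-model", ["list","details","edit","delete","create"])],
      PySem.Dict.mk [("category-request", ["list","details","edit","delete","create"])],
      PySem.Dict.mk [("/", ["index"])]]),
    ("CUSTOMER", [])]

def get_permission (role : String) (resource : String) (action : String) : Bool :=
  match PySem.Dict.get? PERMISSION role with
  | none => false            -- PERMISSION.get(role) is None: falsy, the outer else returns False
  | some permissions =>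
    if permissions.isEmpty then false   -- "if permissions:" — empty list is falsy
    else
      -- Python: permissions[0] != "*" compares a dict to a string, which is always True
      -- (no PySem primitive for cross-type !=; the constant true is exact here).
      if true then
        let count : Nat := permissions.foldl (fun c perm =>
          match PySem.Dict.get? perm resource with
          | none => c                              -- permission.get(resource) is None: continue
          | some pr =>
            if pr.isEmpty then c                   -- falsy empty list: continue
            else if pr.contains action then c + 1  -- "if action in permission_resource"
            else c) 0
        if count == 0 then false else true
      else true

-- ===== PORT B =====
-- B: hard-coded decision tree on role, then resource, then a literal action tuple.
def CRUD : List String := ["list", "details", "edit", "delete", "create"]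

def get_permission_alt (role : String) (resource : String) (action : String) : Bool :=
  if role = "ADMIN" then
    if resource = "user-model" then
      ["list", "details", "view"].contains action
    else if ["store-model", "category-request"].contains resource then
      CRUD.contains action
    else if resource = "/" then
      action = "index"
    else false
  else if role = "STORE_OWNER" then
    if ["book-model", "category-model", "order-model",
        "order-item-model", "category-request"].contains resource then
      CRUD.contains action
    else if resource = "/" then
      action = "index"
    else false
  else false

-- ===== PRECONDITION & SPEC =====
def Spec_get_permission (role : String) (resource : String) (action : String) (out : Bool) : Prop := out = get_permission_alt role resource action
instance (role : String) (resource : String) (action : String) (out : Bool) : Decidable (Spec_get_permission role resource action out) := by unfold Spec_get_permission; infer_instance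

-- ===== CLAIM (what is proved, stated in full; the proofs are below) =====
def Claim_equal_get_permission : Prop := ∀ (role : String) (resource : String) (action : String), Dom_get_permission role resource action → Spec_get_permission role resource action (get_permission role resource action)

-- ===== LEMMAS AND PROOFS =====

-- ===== VERDICT (by name: the statement is the Claim_ definition above) =====
theorem get_permission_spec : Claim_equal_get_permission := by
  intro role resource action _
  unfold Spec_get_permission
  by_cases hADMIN : role = "ADMIN"
  · subst hADMIN
    by_cases r1 : resource = "user-model"
    · subst r1; simp [get_permission, get_permission_alt, PERMISSION, CRUD, PySem.Dict.get?, List.foldl]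
    by_cases r2 : resource = "store-model"
    · subst r2; simp [get_permission, get_permission_alt, PERMISSION, CRUD, PySem.Dict.get?, List.foldl]
    by_cases r3 : resource = "category-request"
    · subst r3; simp [get_permission, get_permission_alt, PERMISSION, CRUD, PySem.Dict.get?, List.foldl]
    by_cases r4 : resource = "/"
    · subst r4; simp [get_permission, get_permission_alt, PERMISSION, CRUD, PySem.Dict.get?, List.foldl]
    · simp [get_permission, get_permission_alt, PERMISSION, CRUD, PySem.Dict.get?, List.foldl,
        r1, r2, r3, r4, Ne.symm r1, Ne.symm r2, Ne.symm r3, Ne.symm r4]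
  by_cases hSO : role = "STORE_OWNER"
  · subst hSO
    by_cases r1 : resource = "book-model"
    · subst r1; simp [get_permission, get_permission_alt, PERMISSION, CRUD, PySem.Dict.get?, List.foldl]
    by_cases r2 : resource = "category-model"
    · subst r2; simp [get_permission, get_permission_alt, PERMISSION, CRUD, PySem.Dict.get?, List.foldl]
    by_cases r3 : resource = "order-model"
    · subst r3; simp [get_permission, get_permission_alt, PERMISSION, CRUD, PySem.Dict.get?, List.foldl]
    by_cases r4 : resource = "order-item-model"
    · subst r4; simp [get_permission, get_permission_alt, PERMISSION, CRUD, PySem.Dict.get?, List.foldl]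
    by_cases r5 : resource = "category-request"
    · subst r5; simp [get_permission, get_permission_alt, PERMISSION, CRUD, PySem.Dict.get?, List.foldl]
    by_cases r6 : resource = "/"
    · subst r6; simp [get_permission, get_permission_alt, PERMISSION, CRUD, PySem.Dict.get?, List.foldl]
    · simp [get_permission, get_permission_alt, PERMISSION, CRUD, PySem.Dict.get?, List.foldl,
        r1, r2, r3, r4, r5, r6, Ne.symm r1, Ne.symm r2, Ne.symm r3, Ne.symm r4, Ne.symm r5, Ne.symm r6]
  by_cases hC : role = "CUSTOMER"
  · subst hC; simp [get_permission, get_permission_alt, PERMISSION, PySem.Dict.get?]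
  · simp [get_permission, get_permission_alt, PERMISSION, PySem.Dict.get?,
      hADMIN, hSO, hC, Ne.symm hADMIN, Ne.symm hSO, Ne.symm hC]
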